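-- pv_equiv track=rewrite | github.com/YusiZhang/leetcode-python | DP/Palindrome-Partitioning-ii.py | getIsPalindrome
-- ===== SOURCE A (Python) =====
-- def getIsPalindrome(s):
--     isPalindrome = [[False for _ in range(len(s))] for _ in range(len(s))]
--
--     for i in range(len(s)):
--         isPalindrome[i][i] = True
--
--     for i in range(len(s) - 1):
--         isPalindrome[i][i+1] = (s[i] == s[i+1])
--
--     for length in range(2, len(s)):
--         for start in range(len(s) - length):
--             isPalindrome[start][start+length] = isPalindrome[start+1][start + length -1] and s[start] == s[start + length]
--
--     return isPalindrome
-- ===== SOURCE B (Python) =====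
-- def getIsPalindrome(s):
--     n = len(s)
--     return [[j >= i and s[i:j + 1] == s[i:j + 1][::-1] for j in range(n)]
--             for i in range(n)]
-- ===== Notes on version B (the rewrite author's own statement) =====
-- stated objective: simpler
-- what changed: Replaces the gap-length DP recurrence over a mutated n x n table with a direct nested comprehension that marks cell (i,j) by comparing the substring s[i:j+1] with its reverse.
import Mathlib
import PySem

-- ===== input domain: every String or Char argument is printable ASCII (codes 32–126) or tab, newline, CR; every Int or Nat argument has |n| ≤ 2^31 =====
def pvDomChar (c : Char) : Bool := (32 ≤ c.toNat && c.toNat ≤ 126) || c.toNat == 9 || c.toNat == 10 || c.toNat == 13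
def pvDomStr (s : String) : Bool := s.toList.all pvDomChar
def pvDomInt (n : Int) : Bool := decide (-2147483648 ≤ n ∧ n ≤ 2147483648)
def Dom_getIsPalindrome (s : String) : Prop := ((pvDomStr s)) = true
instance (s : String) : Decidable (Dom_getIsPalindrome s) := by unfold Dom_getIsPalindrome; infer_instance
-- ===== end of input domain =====

-- B replaces A's gap-length DP table fill with a direct substring-vs-reverse comprehension (simpler; not faster).

-- ===== PORT A =====
-- isPalindrome[i][j] read/write on the nested list (all indices A uses are in range, so getD is exact)
def pvCell (t : List (List Bool)) (i j : Nat) : Bool := (t.getD i []).getD j false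
def pvSet (t : List (List Bool)) (i j : Nat) (b : Bool) : List (List Bool) :=
  t.set i ((t.getD i []).set j b)

-- literal port of A: the all-False n×n table, then the three fill loops
-- (all loop indices are nonnegative and in range, so Nat ranges and getD-indexing are exact)
def getIsPalindrome (s : String) : List (List Bool) :=
  let l := s.toList
  let n := l.length
  let t0 : List (List Bool) := (List.range n).map (fun _ => (List.range n).map (fun _ => false))
  let t1 := (List.range n).foldl (fun t i => pvSet t i i true) t0
  let t2 := (List.range (n - 1)).foldl
      (fun t i => pvSet t i (i+1) (l.getD i ' ' == l.getD (i+1) ' ')) t1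
  (List.range' 2 (n - 2)).foldl
      (fun t len => (List.range (n - len)).foldl
        (fun t st =>
          pvSet t st (st+len) (pvCell t (st+1) (st+len-1) && (l.getD st ' ' == l.getD (st+len) ' ')))
        t)
      t2

-- ===== PORT B =====
-- one cell of B's comprehension; s[i:j+1] for 0 ≤ i,j < n is exactly (l.drop i).take (j+1-i)
-- (Nat subtraction yields [] when j < i, matching Python's empty slice there)
def pvPalCell (l : List Char) (i j : Nat) : Bool :=
  decide (i ≤ j) && (((l.drop i).take (j + 1 - i)) == ((l.drop i).take (j + 1 - i)).reverse)

def getIsPalindrome_alt (s : String) : List (List Bool) :=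
  let l := s.toList
  let n := l.length
  (List.range n).map (fun i => (List.range n).map (fun j => pvPalCell l i j))

-- ===== PRECONDITION & SPEC =====
def Spec_getIsPalindrome (s : String) (out : List (List Bool)) : Prop := out = getIsPalindrome_alt s
instance (s : String) (out : List (List Bool)) : Decidable (Spec_getIsPalindrome s out) := by unfold Spec_getIsPalindrome; infer_instance

-- ===== CLAIM (what is proved, stated in full; the proofs are below) =====
def Claim_equal_getIsPalindrome : Prop := ∀ (s : String), Dom_getIsPalindrome s → Spec_getIsPalindrome s (getIsPalindrome s)

-- ===== LEMMAS AND PROOFS =====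

-- an n×n table shape, preserved by pvSet
def pvShaped (n : Nat) (t : List (List Bool)) : Prop :=
  t.length = n ∧ ∀ i, i < n → (t.getD i []).length = n

theorem pvGetD_set {α : Type} (t : List α) (i : Nat) (r d : α) (i' : Nat) :
    (t.set i r).getD i' d = if i' = i ∧ i < t.length then r else t.getD i' d := by
  simp only [List.getD_eq_getElem?_getD, List.getElem?_set]
  by_cases h : i = i'
  · subst h
    by_cases h2 : i < t.length
    · simp [h2]
    · simp [h2]
  · rw [if_neg h, if_neg (fun hc => h hc.1.symm)]

theorem pvShaped_set {n : Nat} {t : List (List Bool)} (h : pvShaped n t)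
    {i : Nat} (hi : i < n) (j : Nat) (b : Bool) : pvShaped n (pvSet t i j b) := by
  obtain ⟨hl, hr⟩ := h
  refine ⟨by simp [pvSet, hl], ?_⟩
  intro i' hi'
  rw [pvSet, pvGetD_set]
  split_ifs with hc
  · rw [List.length_set]; exact hr i hi
  · exact hr i' hi'

theorem pvCell_set {n : Nat} {t : List (List Bool)} (h : pvShaped n t)
    {i j : Nat} (hi : i < n) (hj : j < n) (b : Bool) (i' j' : Nat) :
    pvCell (pvSet t i j b) i' j' = if i' = i ∧ j' = j then b else pvCell t i' j' := by
  obtain ⟨hl, hr⟩ := h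
  rw [pvCell, pvSet, pvGetD_set]
  by_cases hii : i' = i
  · subst hii
    have hrl : (t.getD i' []).length = n := hr i' hi
    rw [if_pos ⟨rfl, by omega⟩, pvGetD_set, hrl]
    by_cases hjj : j' = j
    · rw [if_pos ⟨hjj, hj⟩, if_pos ⟨rfl, hjj⟩]
    · rw [if_neg (fun hc => hjj hc.1), if_neg (fun hc => hjj hc.2)]; rfl
  · rw [if_neg (fun hc => hii hc.1), if_neg (fun hc => hii hc.1)]; rfl

theorem pvCell_t0 (n i j : Nat) :
    pvCell ((List.range n).map (fun _ => (List.range n).map (fun _ => false))) i j = false := by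
  unfold pvCell
  simp only [List.getD_eq_getElem?_getD]
  cases e : ((List.range n).map (fun _ => (List.range n).map (fun _ => false)))[i]? with
  | none => simp
  | some r =>
    obtain ⟨a, -, rfl⟩ := List.mem_map.mp (List.mem_of_getElem? e)
    rw [Option.getD_some]
    cases e2 : ((List.range n).map (fun _ : Nat => false))[j]? with
    | none => simp
    | some b =>
      obtain ⟨a2, -, rfl⟩ := List.mem_map.mp (List.mem_of_getElem? e2)
      rw [Option.getD_some]

theorem pvShaped_t0 (n : Nat) :
    pvShaped n ((List.range n).map (fun _ => (List.range n).map (fun _ => false))) := by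
  refine ⟨by simp, ?_⟩
  intro i hi
  rw [List.getD_eq_getElem _ _ (by simp [hi])]
  simp

-- singleton substrings are palindromes
theorem pvPalCell_diag {l : List Char} {i : Nat} (h : i < l.length) : pvPalCell l i i = true := by
  unfold pvPalCell
  rw [List.drop_eq_getElem_cons h]
  have h1 : i + 1 - i = 1 := by omega
  rw [h1, List.take_succ_cons, List.take_zero]
  simp

-- length-2 substrings: palindrome iff the two characters agree
theorem pvPalCell_pair {l : List Char} {i : Nat} (h : i + 1 < l.length) :
    pvPalCell l i (i+1) = (l.getD i ' ' == l.getD (i+1) ' ') := by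
  unfold pvPalCell
  rw [List.drop_eq_getElem_cons (by omega), List.drop_eq_getElem_cons h]
  rw [List.getD_eq_getElem _ _ (by omega), List.getD_eq_getElem _ _ h]
  have h2 : i + 1 + 1 - i = 2 := by omega
  rw [h2, List.take_succ_cons, List.take_succ_cons, List.take_zero]
  by_cases hc : l[i] = l[i+1]
  · simp [hc]
  · simp only [List.reverse_cons, List.reverse_nil, List.nil_append, List.cons_append]
    rw [Bool.eq_iff_iff]
    simp [hc, Ne.symm hc]

-- the DP recurrence computes exactly B's substring-vs-reverse test
theorem pvPalCell_rec {l : List Char} {st L : Nat} (h2 : 2 ≤ L) (hn : st + L < l.length) :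
    pvPalCell l st (st + L)
      = (pvPalCell l (st+1) (st + L - 1) && (l.getD st ' ' == l.getD (st+L) ' ')) := by
  have hst : st < l.length := by omega
  have hmid : st + L - 1 + 1 - (st + 1) = L - 1 := by omega
  have houter : st + L + 1 - st = (L - 1) + 1 + 1 := by omega
  have hdroplen : L - 1 < (l.drop (st+1)).length := by rw [List.length_drop]; omega
  have hidx : st + 1 + (L - 1) = st + L := by omega
  -- decompose the outer substring as head :: middle ++ [last]
  have hsplit : (l.drop st).take (st + L + 1 - st)
      = l[st] :: ((l.drop (st+1)).take (L - 1) ++ [l[st+L]]) := by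
    rw [houter, List.drop_eq_getElem_cons hst, List.take_succ_cons, List.take_add_one,
        List.getElem?_eq_getElem hdroplen]
    simp [List.getElem_drop, hidx]
  unfold pvPalCell
  rw [hsplit, hmid]
  rw [List.getD_eq_getElem _ _ hst, List.getD_eq_getElem _ _ hn]
  have hg1 : decide (st ≤ st + L) = true := by simp
  have hg2 : decide (st + 1 ≤ st + L - 1) = true := by simp only [decide_eq_true_eq]; omega
  rw [hg1, hg2]
  simp only [Bool.true_and, List.reverse_cons, List.reverse_append,
    List.reverse_nil, List.nil_append, List.append_assoc]
  set m := (l.drop (st+1)).take (L - 1)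
  have key : (l[st] :: (m ++ [l[st+L]]) == [l[st+L]] ++ (m.reverse ++ [l[st]]))
       = ((m == m.reverse) && (l[st] == l[st+L])) := by
    rw [Bool.eq_iff_iff]
    simp only [beq_iff_eq, Bool.and_eq_true]
    constructor
    · intro hcontra
      rw [List.singleton_append] at hcontra
      obtain ⟨h1, hrest⟩ := List.cons_eq_cons.mp hcontra
      exact ⟨(List.append_singleton_inj.mp hrest).1, h1⟩
    · rintro ⟨hmm, hab⟩
      rw [List.singleton_append, ← hmm, hab]
  rw [key]

-- invariant after all gaps ≤ L have been filled
def pvInv (l : List Char) (L : Nat) (t : List (List Bool)) : Prop :=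
  pvShaped l.length t ∧ ∀ i j, pvCell t i j =
    if i ≤ j ∧ j < l.length ∧ j - i ≤ L then pvPalCell l i j else false

-- the diagonal loop
theorem pvPhase1 (n k : Nat) (hk : k ≤ n) :
    pvShaped n ((List.range k).foldl (fun t i => pvSet t i i true)
        ((List.range n).map (fun _ => (List.range n).map (fun _ => false))))
    ∧ ∀ i j, pvCell ((List.range k).foldl (fun t i => pvSet t i i true)
        ((List.range n).map (fun _ => (List.range n).map (fun _ => false)))) i j
        = decide (i = j ∧ i < k) := by
  induction k with
  | zero =>
    simp only [List.range_zero, List.foldl_nil]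
    refine ⟨pvShaped_t0 n, fun i j => ?_⟩
    rw [pvCell_t0]
    simp
  | succ k ih =>
    obtain ⟨hs, hc⟩ := ih (by omega)
    rw [List.range_succ, List.foldl_append, List.foldl_cons, List.foldl_nil]
    refine ⟨pvShaped_set hs (by omega) _ _, ?_⟩
    intro i j
    rw [pvCell_set hs (by omega) (by omega), hc]
    split_ifs with h
    · exact (decide_eq_true ⟨by omega, by omega⟩).symm
    · rw [decide_eq_decide]; omega

-- the adjacent-pair loop
theorem pvPhase2 (l : List Char) (k : Nat) (hk : k ≤ l.length - 1) :
    pvShaped l.length ((List.range k).foldl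
        (fun t i => pvSet t i (i+1) (l.getD i ' ' == l.getD (i+1) ' '))
        ((List.range l.length).foldl (fun t i => pvSet t i i true)
          ((List.range l.length).map (fun _ => (List.range l.length).map (fun _ => false)))))
    ∧ ∀ i j, pvCell ((List.range k).foldl
        (fun t i => pvSet t i (i+1) (l.getD i ' ' == l.getD (i+1) ' '))
        ((List.range l.length).foldl (fun t i => pvSet t i i true)
          ((List.range l.length).map (fun _ => (List.range l.length).map (fun _ => false))))) i j
        = if i = j ∧ i < l.length then true
          else if j = i + 1 ∧ i < k then (l.getD i ' ' == l.getD (i+1) ' ') else false := by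
  induction k with
  | zero =>
    obtain ⟨hs, hc⟩ := pvPhase1 l.length l.length le_rfl
    simp only [List.range_zero, List.foldl_nil]
    refine ⟨hs, fun i j => ?_⟩
    rw [hc]
    split_ifs with ha hb
    · exact decide_eq_true ha
    · omega
    · simpa using ha
  | succ k ih =>
    obtain ⟨hs, hc⟩ := ih (by omega)
    rw [List.range_succ, List.foldl_append, List.foldl_cons, List.foldl_nil]
    refine ⟨pvShaped_set hs (by omega) _ _, ?_⟩
    intro i j
    rw [pvCell_set hs (by omega) (by omega), hc]
    by_cases hij : i = k ∧ j = k + 1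
    · obtain ⟨hh1, hh2⟩ := hij; subst hh1; subst hh2
      rw [if_pos ⟨rfl, rfl⟩, if_neg (by omega), if_pos ⟨rfl, by omega⟩]
    · rw [if_neg hij]
      split_ifs with ha hb hc hc
      · rfl
      · rfl
      · exfalso; exact hc ⟨hb.1, by omega⟩
      · exfalso; exact hij ⟨by omega, by omega⟩
      · rfl

-- after the pair loop the invariant holds for gaps ≤ 1
theorem pvInv_base (l : List Char) :
    pvInv l 1 ((List.range (l.length - 1)).foldl
        (fun t i => pvSet t i (i+1) (l.getD i ' ' == l.getD (i+1) ' '))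
        ((List.range l.length).foldl (fun t i => pvSet t i i true)
          ((List.range l.length).map (fun _ => (List.range l.length).map (fun _ => false))))) := by
  obtain ⟨hs, hc⟩ := pvPhase2 l (l.length - 1) le_rfl
  refine ⟨hs, ?_⟩
  intro i j
  rw [hc]
  by_cases h1 : i = j ∧ i < l.length
  · obtain ⟨h1, h1'⟩ := h1; subst h1
    simp [h1', pvPalCell_diag h1']
  · rw [if_neg h1]
    by_cases h2 : j = i + 1 ∧ i < l.length - 1
    · obtain ⟨h2, h2'⟩ := h2; subst h2
      rw [if_pos ⟨rfl, h2'⟩, if_pos ⟨by omega, by omega, by omega⟩]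
      exact (pvPalCell_pair (by omega)).symm
    · rw [if_neg h2]
      split_ifs with h3
      · exfalso
        obtain ⟨ha, hb, hcc⟩ := h3
        have hd : j = i ∨ j = i + 1 := by omega
        rcases hd with hd | hd
        · exact h1 ⟨by omega, by omega⟩
        · exact h2 ⟨by omega, by omega⟩
      · rfl

-- the inner loop over start positions for a fixed gap L
theorem pvInner (l : List Char) (L : Nat) (h2 : 2 ≤ L) (hLn : L < l.length)
    (t : List (List Bool)) (ht : pvInv l (L-1) t) (k : Nat) (hk : k ≤ l.length - L) :
    pvShaped l.length ((List.range k).foldl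
        (fun t st => pvSet t st (st+L)
          (pvCell t (st+1) (st+L-1) && (l.getD st ' ' == l.getD (st+L) ' '))) t)
    ∧ ∀ i j, pvCell ((List.range k).foldl
        (fun t st => pvSet t st (st+L)
          (pvCell t (st+1) (st+L-1) && (l.getD st ' ' == l.getD (st+L) ' '))) t) i j
        = if i ≤ j ∧ j < l.length ∧ (j - i ≤ L - 1 ∨ (j - i = L ∧ i < k)) then pvPalCell l i j
          else false := by
  induction k with
  | zero =>
    simp only [List.range_zero, List.foldl_nil]
    refine ⟨ht.1, ?_⟩
    intro i j
    rw [ht.2 i j]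
    split_ifs with ha hb hb <;> first | rfl | (exfalso; omega)
  | succ k ih =>
    obtain ⟨hs, hc⟩ := ih (by omega)
    rw [List.range_succ, List.foldl_append, List.foldl_cons, List.foldl_nil]
    have hkL : k + L < l.length := by omega
    refine ⟨pvShaped_set hs (by omega) _ _, ?_⟩
    intro i j
    rw [pvCell_set hs (by omega) hkL]
    have hval : pvCell ((List.range k).foldl
        (fun t st => pvSet t st (st+L)
          (pvCell t (st+1) (st+L-1) && (l.getD st ' ' == l.getD (st+L) ' '))) t)
        (k+1) (k+L-1) = pvPalCell l (k+1) (k+L-1) := by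
      rw [hc]
      rw [if_pos ⟨by omega, by omega, Or.inl (by omega)⟩]
    rw [hval, hc]
    by_cases hij : i = k ∧ j = k + L
    · obtain ⟨hi, hj⟩ := hij; subst hi; subst hj
      rw [if_pos ⟨rfl, rfl⟩, if_pos ⟨by omega, hkL, Or.inr ⟨by omega, by omega⟩⟩]
      exact (pvPalCell_rec h2 hkL).symm
    · rw [if_neg hij]
      split_ifs with ha hb hb
      · rfl
      · exact absurd ⟨ha.1, ha.2.1, by omega⟩ hb
      · exact absurd ⟨by omega, by omega⟩ hij
      · rfl

-- the outer loop over gap lengths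
theorem pvOuter (l : List Char) (m : Nat) (hm : m ≤ l.length - 2) :
    pvInv l (m+1) ((List.range' 2 m).foldl
      (fun t len => (List.range (l.length - len)).foldl
        (fun t st => pvSet t st (st+len)
          (pvCell t (st+1) (st+len-1) && (l.getD st ' ' == l.getD (st+len) ' '))) t)
      ((List.range (l.length - 1)).foldl
        (fun t i => pvSet t i (i+1) (l.getD i ' ' == l.getD (i+1) ' '))
        ((List.range l.length).foldl (fun t i => pvSet t i i true)
          ((List.range l.length).map (fun _ => (List.range l.length).map (fun _ => false)))))) := by
  induction m with
  | zero =>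
    simp only [List.range'_zero, List.foldl_nil]
    exact pvInv_base l
  | succ m ih =>
    have hprev := ih (by omega)
    rw [List.range'_1_concat, List.foldl_append, List.foldl_cons, List.foldl_nil]
    have h21 : (2 : Nat) + m = m + 2 := by omega
    rw [h21]
    obtain ⟨hs, hc⟩ := pvInner l (m+2) (by omega) (by omega) _ hprev (l.length - (m+2)) le_rfl
    refine ⟨hs, ?_⟩
    intro i j
    rw [hc]
    split_ifs with ha hb hb
    · rfl
    · exfalso; exact hb ⟨ha.1, ha.2.1, by omega⟩
    · exfalso; exact ha ⟨hb.1, hb.2.1, by omega⟩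
    · rfl

theorem getIsPalindrome_spec : Claim_equal_getIsPalindrome := by
  intro s _
  unfold Spec_getIsPalindrome getIsPalindrome getIsPalindrome_alt
  obtain ⟨⟨hlen, hrow⟩, hc⟩ := pvOuter s.toList (s.toList.length - 2) le_rfl
  apply List.ext_getElem
  · rw [hlen]; simp
  · intro i h1 h2
    rw [List.getElem_map, List.getElem_range]
    have hi : i < s.toList.length := by simpa using h2
    apply List.ext_getElem
    · have hr := hrow i hi
      rw [List.getD_eq_getElem _ _ h1] at hr
      rw [hr]; simp
    · intro j g1 g2
      rw [List.getElem_map, List.getElem_range]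
      have hj : j < s.toList.length := by simpa using g2
      have hcell := hc i j
      rw [pvCell, List.getD_eq_getElem _ _ h1, List.getD_eq_getElem _ _ g1] at hcell
      rw [hcell]
      by_cases hle : i ≤ j
      · rw [if_pos ⟨hle, hj, by omega⟩]
      · rw [if_neg (fun hcond => hle hcond.1)]
        unfold pvPalCell
        simp [hle]
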